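-- pv_equiv track=rewrite | github.com/Antohhin/algos-tutorial | from_interviews/vector_length.py | max_vector_seq
-- ===== SOURCE A (Python) =====
-- def max_vector_seq(f):
--     current_length, max_lenght = 0, 0
--     for num in f:
--         if num > 0:
--             current_length += 1
--             max_lenght = max(max_lenght, current_length)
--         else:
--             current_length = 0
--     return max_lenght
-- ===== SOURCE B (Python) =====
-- def max_vector_seq(f):
--     best = 0
--     i = 0
--     n = len(f)
--     while i < n:
--         if f[i] > 0:
--             j = i
--             while j < n and f[j] > 0:
--                 j += 1
--             if j - i > best:
--                 best = j - i
--             i = j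
--         else:
--             i += 1
--     return best
-- ===== Notes on version B (the rewrite author's own statement) =====
-- stated objective: alternative
-- what changed: Replaces the reset-on-nonpositive running counter with a group-then-measure decomposition: scan to the end of each maximal positive run, take its length, jump past it, and keep the maximum.
import Mathlib
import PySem

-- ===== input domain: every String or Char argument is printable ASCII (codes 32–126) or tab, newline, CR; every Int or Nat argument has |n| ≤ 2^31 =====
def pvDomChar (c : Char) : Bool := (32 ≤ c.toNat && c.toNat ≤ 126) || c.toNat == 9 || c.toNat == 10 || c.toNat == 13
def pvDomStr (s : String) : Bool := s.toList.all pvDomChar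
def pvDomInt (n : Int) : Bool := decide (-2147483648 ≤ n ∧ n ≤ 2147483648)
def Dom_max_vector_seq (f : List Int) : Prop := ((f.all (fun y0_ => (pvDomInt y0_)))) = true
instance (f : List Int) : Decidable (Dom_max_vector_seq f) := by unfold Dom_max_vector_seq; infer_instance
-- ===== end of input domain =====

-- B replaces A's reset-on-nonpositive running counter with a group-then-measure scan over
-- maximal positive runs (alternative decomposition, same cost).

-- ===== PORT A =====
-- A's for-loop over f with state (current_length, max_lenght), as structural recursion.
def maxLoopA : List Int → Int → Int → Int
  | [], _, best => best
  | num :: rest, cur, best =>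
    if num > 0 then maxLoopA rest (cur + 1) (max best (cur + 1))
    else maxLoopA rest 0 best

def max_vector_seq (f : List Int) : Int := maxLoopA f 0 0

-- ===== PORT B =====
-- B's outer while-loop; the inner 'while f[j] > 0' scan of a run is the takeWhile/dropWhile pair.
def maxRunGo : List Int → Int → Int
  | [], best => best
  | x :: xs, best =>
    if x > 0 then
      let run := (x :: xs).takeWhile (fun y => decide (0 < y))
      maxRunGo ((x :: xs).dropWhile (fun y => decide (0 < y))) (max best (run.length : Int))
    else maxRunGo xs best
termination_by l _ => l.length
decreasing_by
  · simp_all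
    exact List.length_dropWhile_le _ xs
  · simp

def max_vector_seq_alt (f : List Int) : Int := maxRunGo f 0

-- ===== PRECONDITION & SPEC =====
def Spec_max_vector_seq (f : List Int) (out : Int) : Prop := out = max_vector_seq_alt f
instance (f : List Int) (out : Int) : Decidable (Spec_max_vector_seq f out) := by unfold Spec_max_vector_seq; infer_instance

-- ===== CLAIM (what is proved, stated in full; the proofs are below) =====
def Claim_equal_max_vector_seq : Prop := ∀ (f : List Int), Dom_max_vector_seq f → Spec_max_vector_seq f (max_vector_seq f)

-- ===== LEMMAS AND PROOFS =====

-- The head of a nonempty dropWhile result fails the predicate.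
lemma dropWhile_head_false {α : Type} (p : α → Bool) :
    ∀ (l : List α) (y : α) (ys : List α), l.dropWhile p = y :: ys → p y = false := by
  intro l
  induction l with
  | nil => intro y ys h; simp at h
  | cons a as ih =>
    intro y ys h
    by_cases hpa : p a = true
    · rw [List.dropWhile_cons_of_pos hpa] at h; exact ih y ys h
    · rw [List.dropWhile_cons_of_neg hpa] at h
      cases h; simpa using hpa

-- Running A's loop over an all-positive block r: cur grows by r.length, best
-- absorbs max best (cur + r.length) (under the invariant cur ≤ best).
lemma maxLoopA_pos_run (r : List Int) :
    ∀ (rest : List Int) (cur best : Int), (∀ y ∈ r, 0 < y) → cur ≤ best →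
      maxLoopA (r ++ rest) cur best = maxLoopA rest (cur + r.length) (max best (cur + r.length)) := by
  induction r with
  | nil =>
    intro rest cur best _ hcb
    simp [max_eq_left hcb]
  | cons x r' ih =>
    intro rest cur best hpos hcb
    have hx : 0 < x := hpos x (by simp)
    have hr' : ∀ y ∈ r', 0 < y := fun y hy => hpos y (by simp [hy])
    simp only [List.cons_append, maxLoopA, if_pos hx]
    rw [ih rest (cur + 1) (max best (cur + 1)) hr' (le_max_right _ _)]
    congr 1
    · push_cast [List.length_cons]; ring
    · push_cast [List.length_cons]; omega

lemma maxLoopA_eq_maxRunGo : ∀ (n : ℕ) (l : List Int), l.length ≤ n →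
    ∀ best : Int, 0 ≤ best → maxLoopA l 0 best = maxRunGo l best := by
  intro n
  induction n with
  | zero =>
    intro l hl best _
    have : l = [] := List.eq_nil_of_length_eq_zero (Nat.le_zero.mp hl)
    subst this; simp [maxLoopA, maxRunGo]
  | succ n ih =>
    intro l hl best hb
    match l with
    | [] => simp [maxLoopA, maxRunGo]
    | x :: xs =>
      by_cases hx : 0 < x
      · set p : Int → Bool := fun y => decide (0 < y) with hp
        have hsplit : (x :: xs).takeWhile p ++ (x :: xs).dropWhile p = x :: xs :=
          List.takeWhile_append_dropWhile
        have hposr : ∀ y ∈ (x :: xs).takeWhile p, 0 < y := by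
          intro y hy
          have := List.mem_takeWhile_imp hy
          simpa [hp] using this
        have hrun : maxLoopA (x :: xs) 0 best
            = maxLoopA ((x :: xs).dropWhile p) ((x :: xs).takeWhile p).length
                (max best ((x :: xs).takeWhile p).length) := by
          conv_lhs => rw [← hsplit]
          rw [maxLoopA_pos_run _ _ 0 best hposr hb]
          simp
        have hdlen : ((x :: xs).dropWhile p).length ≤ xs.length := by
          have h1 : (x :: xs).dropWhile p = xs.dropWhile p := by
            simp [List.dropWhile_cons, hp, hx]
          rw [h1]; exact List.length_dropWhile_le _ _
        have hdrop : maxLoopA ((x :: xs).dropWhile p)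
              ((x :: xs).takeWhile p).length (max best ((x :: xs).takeWhile p).length)
            = maxRunGo ((x :: xs).dropWhile p) (max best ((x :: xs).takeWhile p).length) := by
          match hd : (x :: xs).dropWhile p with
          | [] => simp [maxLoopA, maxRunGo]
          | y :: ys =>
            have hy : p y = false := dropWhile_head_false p (x :: xs) y ys hd
            have hyneg : ¬ (0 < y) := by simpa [hp] using hy
            have hlen : ys.length ≤ n := by
              have : (y :: ys).length ≤ xs.length := hd ▸ hdlen
              simp at this hl; omega
            rw [maxRunGo]
            simp only [maxLoopA, if_neg hyneg]
            exact ih ys hlen _ (le_trans hb (le_max_left _ _))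
        rw [hrun, hdrop]
        conv_rhs => rw [maxRunGo]
        simp [hx, hp]
      · have hlen : xs.length ≤ n := by simp at hl; omega
        rw [maxRunGo]
        simp only [maxLoopA, if_neg hx]
        exact ih xs hlen best hb

-- ===== VERDICT (by name: the statement is the Claim_ definition above) =====
theorem max_vector_seq_spec : Claim_equal_max_vector_seq := by
  intro f _
  unfold Spec_max_vector_seq max_vector_seq max_vector_seq_alt
  exact maxLoopA_eq_maxRunGo f.length f le_rfl 0 le_rfl
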